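-- pv_equiv track=rewrite | github.com/maburgos12/pollyanas-dolce-erp | recetas/management/commands/importar_ventas_point_archivos.py | _rows_look_like_sales
-- ===== SOURCE A (Python) =====
-- from typing import Any
--
-- def _rows_look_like_sales(rows: list[dict[str, Any]]) -> bool:
--     if not rows:
--         return False
--     seen_fecha = False
--     seen_cantidad = False
--     seen_producto_ref = False
--     sample = rows[:50]
--     for row in sample:
--         keys = {str(k or "").strip().lower() for k in (row or {}).keys()}
--         if "fecha" in keys:
--             seen_fecha = True
--         if "cantidad" in keys:
--             seen_cantidad = True
--         if "receta" in keys or "codigo_point" in keys: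
--             seen_producto_ref = True
--         if seen_fecha and seen_cantidad and seen_producto_ref:
--             return True
--     return False
-- ===== SOURCE B (Python) =====
-- def _seen(sample: list, name: str) -> bool:
--     return any(
--         any(str(k or "").strip().lower() == name for k in (row or {}).keys())
--         for row in sample
--     )
--
-- def _rows_look_like_sales(rows: list) -> bool:
--     if not rows:
--         return False
--     sample = rows[:50]
--     return (
--         _seen(sample, "fecha")
--         and _seen(sample, "cantidad")
--         and (_seen(sample, "receta") or _seen(sample, "codigo_point"))
--     )
-- ===== Notes on version B (the rewrite author's own statement) =====
-- stated objective: simpler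
-- what changed: Replaced the single pass with three monotone flags and early exit by independent per-target-key searches: a helper scans rows[:50] for one normalized key at a time and the result is a boolean combination of four such searches, with no set construction and no flag state at all.
import Mathlib
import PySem

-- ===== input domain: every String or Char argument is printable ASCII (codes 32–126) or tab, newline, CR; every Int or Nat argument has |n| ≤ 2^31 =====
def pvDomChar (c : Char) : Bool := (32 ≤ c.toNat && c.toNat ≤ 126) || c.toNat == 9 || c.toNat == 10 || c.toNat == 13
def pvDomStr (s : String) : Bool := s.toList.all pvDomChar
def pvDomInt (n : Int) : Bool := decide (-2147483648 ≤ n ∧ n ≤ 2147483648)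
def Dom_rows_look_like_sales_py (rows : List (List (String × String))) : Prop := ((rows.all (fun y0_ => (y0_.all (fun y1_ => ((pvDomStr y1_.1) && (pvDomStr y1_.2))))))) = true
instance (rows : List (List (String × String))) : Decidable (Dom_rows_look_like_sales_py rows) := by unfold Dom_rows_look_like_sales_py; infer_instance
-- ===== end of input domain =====

-- B replaces A's single flagged pass by independent per-target-key searches (one scan per key,
-- no set, no flag state); objective: simpler.


-- ===== PORT A =====
-- {str(k or "").strip().lower() for k in (row or {}).keys()}  (k or "" = k for string keys)
def pvRowKeys (row : List (String × String)) : PySem.Set String :=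
  PySem.Set.ofList (row.map (fun kv => PySem.Str.lower (PySem.Str.strip kv.1)))

-- the for-loop over sample with the three flags and the early return
def pvSalesLoop : List (List (String × String)) → Bool → Bool → Bool → Bool
  | [], _, _, _ => false
  | row :: rest, sf, sc, sp =>
    let keys := pvRowKeys row
    let sf := if keys.contains "fecha" then true else sf
    let sc := if keys.contains "cantidad" then true else sc
    let sp := if keys.contains "receta" || keys.contains "codigo_point" then true else sp
    if sf && sc && sp then true else pvSalesLoop rest sf sc sp

def rows_look_like_sales_py (rows : List (List (String × String))) : Bool :=
  if rows = [] then false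
  else pvSalesLoop (PySem.List.slice rows none (some 50)) false false false

-- ===== PORT B =====
-- _seen(sample, name): any row of sample has a key normalizing to name
def pvSeen (sample : List (List (String × String))) (name : String) : Bool :=
  sample.any (fun row => row.any (fun kv => PySem.Str.lower (PySem.Str.strip kv.1) == name))

def rows_look_like_sales_py_alt (rows : List (List (String × String))) : Bool :=
  if rows = [] then false
  else
    let sample := PySem.List.slice rows none (some 50)
    pvSeen sample "fecha" && pvSeen sample "cantidad" &&
      (pvSeen sample "receta" || pvSeen sample "codigo_point")

-- ===== PRECONDITION & SPEC =====
def Spec_rows_look_like_sales_py (rows : List (List (String × String))) (out : Bool) : Prop := out = rows_look_like_sales_py_alt rows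
instance (rows : List (List (String × String))) (out : Bool) : Decidable (Spec_rows_look_like_sales_py rows out) := by unfold Spec_rows_look_like_sales_py; infer_instance

-- ===== CLAIM =====
def Claim_equal_rows_look_like_sales_py : Prop := ∀ (rows : List (List (String × String))), Dom_rows_look_like_sales_py rows → Spec_rows_look_like_sales_py rows (rows_look_like_sales_py rows)

-- ===== LEMMAS AND PROOFS =====

-- Membership in a row's normalized-key set = B's inner any over that row.
theorem pvRowKeys_contains (row : List (String × String)) (key : String) :
    (pvRowKeys row).contains key =
      row.any (fun kv => PySem.Str.lower (PySem.Str.strip kv.1) == key) := by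
  rw [Bool.eq_iff_iff]
  simp only [pvRowKeys, PySem.Set.contains, List.contains_iff_mem, PySem.Set.mem_ofList,
    List.mem_map, List.any_eq_true, beq_iff_eq]

-- A's loop, characterised: nonempty sample and each wanted key occurs somewhere
-- (the flags are "already seen" accumulators and only ever turn on).
theorem pvSalesLoop_eq (sample : List (List (String × String))) :
    ∀ sf sc sp, pvSalesLoop sample sf sc sp =
      (!sample.isEmpty &&
        ((sf || sample.any (fun row => (pvRowKeys row).contains "fecha")) &&
         (sc || sample.any (fun row => (pvRowKeys row).contains "cantidad")) &&
         (sp || sample.any (fun row => (pvRowKeys row).contains "receta" ||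
                                        (pvRowKeys row).contains "codigo_point")))) := by
  induction sample with
  | nil => intro sf sc sp; simp [pvSalesLoop]
  | cons row rest ih =>
    intro sf sc sp
    simp only [pvSalesLoop, ih, List.any_cons, List.isEmpty_cons]
    cases (pvRowKeys row).contains "fecha" <;>
      cases (pvRowKeys row).contains "cantidad" <;>
      cases (pvRowKeys row).contains "receta" <;>
      cases (pvRowKeys row).contains "codigo_point" <;>
      cases sf <;> cases sc <;> cases sp <;>
      cases h : rest.isEmpty <;> simp_all

-- ===== VERDICT =====
theorem rows_look_like_sales_py_spec : Claim_equal_rows_look_like_sales_py := by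
  intro rows _
  unfold Spec_rows_look_like_sales_py rows_look_like_sales_py rows_look_like_sales_py_alt
  by_cases h : rows = []
  · simp [h]
  · simp only [h, if_false]
    rw [pvSalesLoop_eq]
    have hs : (PySem.List.slice rows none (some 50)).isEmpty = false := by
      rw [PySem.List.slice_to rows (by norm_num)]
      cases rows with
      | nil => exact absurd rfl h
      | cons a t => simp
    simp only [hs, Bool.not_false, Bool.true_and, Bool.false_or, pvSeen]
    rw [Bool.eq_iff_iff]
    simp only [Bool.and_eq_true, Bool.or_eq_true, List.any_eq_true, pvRowKeys_contains]
    constructor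
    · rintro ⟨⟨hf, hc⟩, row, hr, h | h⟩
      · exact ⟨⟨hf, hc⟩, Or.inl ⟨row, hr, h⟩⟩
      · exact ⟨⟨hf, hc⟩, Or.inr ⟨row, hr, h⟩⟩
    · rintro ⟨⟨hf, hc⟩, ⟨row, hr, h⟩ | ⟨row, hr, h⟩⟩
      · exact ⟨⟨hf, hc⟩, row, hr, Or.inl h⟩
      · exact ⟨⟨hf, hc⟩, row, hr, Or.inr h⟩
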